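-- pv_equiv track=rewrite | github.com/MiluchOK/racing-adapter | src/calibrate.py | find_changed_byte
-- ===== SOURCE A (Python) =====
-- def find_changed_byte(baseline: list[int], sample: list[int], threshold: int = 10) -> int:
--     """Find the byte that changed most from baseline."""
--     max_diff = 0
--     best_byte = -1
--
--     for i, (base, curr) in enumerate(zip(baseline, sample)):
--         diff = abs(curr - base)
--         if diff > max_diff and diff >= threshold:
--             max_diff = diff
--             best_byte = i
--
--     return best_byte
-- ===== SOURCE B (Python) =====
-- def find_changed_byte(baseline: list[int], sample: list[int], threshold: int = 10) -> int:
--     """Find the byte that changed most from baseline."""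
--     diffs = [abs(c - b) for b, c in zip(baseline, sample)]
--     m = max(diffs, default=0)
--     if m < threshold or m <= 0:
--         return -1
--     return diffs.index(m)
-- ===== Notes on version B (the rewrite author's own statement) =====
-- stated objective: alternative
-- what changed: Replaces the fused running-max/best-index loop with a build-the-diff-table, global max reduction, then first-index lookup decomposition.
import Mathlib
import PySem

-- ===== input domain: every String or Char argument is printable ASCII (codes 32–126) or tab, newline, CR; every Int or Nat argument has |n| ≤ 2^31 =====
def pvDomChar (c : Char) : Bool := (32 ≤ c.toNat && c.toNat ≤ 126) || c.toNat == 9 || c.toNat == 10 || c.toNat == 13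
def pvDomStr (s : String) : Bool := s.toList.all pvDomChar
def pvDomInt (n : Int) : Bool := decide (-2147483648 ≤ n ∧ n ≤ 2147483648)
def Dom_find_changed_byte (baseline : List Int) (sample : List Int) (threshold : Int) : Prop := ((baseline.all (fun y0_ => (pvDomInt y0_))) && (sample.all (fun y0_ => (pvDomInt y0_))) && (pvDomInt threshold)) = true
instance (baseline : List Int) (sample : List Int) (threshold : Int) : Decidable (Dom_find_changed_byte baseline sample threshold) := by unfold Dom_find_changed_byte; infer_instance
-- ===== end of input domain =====

-- B replaces A's fused running-max loop by: build the diff table, take its global max, look up its first index (alternative decomposition, same cost).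


-- ===== PORT A =====
-- loop body of A: diff = abs(curr - base); if diff > max_diff and diff >= threshold: update
def pvStep (threshold : Int) (acc : Int × Int) (ip : Int × (Int × Int)) : Int × Int :=
  let diff := |ip.2.2 - ip.2.1|
  if diff > acc.1 ∧ diff ≥ threshold then (diff, ip.1) else acc

def find_changed_byte (baseline : List Int) (sample : List Int) (threshold : Int) : Int :=
  ((PySem.List.enumerate (List.zip baseline sample) 0).foldl (pvStep threshold) (0, -1)).2

-- ===== PORT B =====
def find_changed_byte_alt (baseline : List Int) (sample : List Int) (threshold : Int) : Int :=
  let diffs := (List.zip baseline sample).map (fun p => |p.2 - p.1|)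
  let m := (PySem.List.max? diffs (fun y => y)).getD 0      -- max(diffs, default=0)
  if m < threshold ∨ m ≤ 0 then -1
  else
    match PySem.List.index? diffs m with                    -- diffs.index(m); never none here since m ∈ diffs
    | some k => (k : Int)
    | none => -1

-- ===== PRECONDITION & SPEC =====
def Spec_find_changed_byte (baseline : List Int) (sample : List Int) (threshold : Int) (out : Int) : Prop := out = find_changed_byte_alt baseline sample threshold
instance (baseline : List Int) (sample : List Int) (threshold : Int) (out : Int) : Decidable (Spec_find_changed_byte baseline sample threshold out) := by unfold Spec_find_changed_byte; infer_instance

-- ===== CLAIM (what is proved, stated in full; the proofs are below) =====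
def Claim_equal_find_changed_byte : Prop := ∀ (baseline : List Int) (sample : List Int) (threshold : Int), Dom_find_changed_byte baseline sample threshold → Spec_find_changed_byte baseline sample threshold (find_changed_byte baseline sample threshold)

-- ===== LEMMAS AND PROOFS =====

lemma pv_foldl_max_eq (xs : List Int) : ∀ (d M : Int), PySem.List.max? xs (fun y => y) = some M → xs.foldl max d = max d M := by
  induction xs with
  | nil => intro d M h; simp [PySem.List.max?] at h
  | cons x xs ih =>
    intro d M h
    rw [PySem.List.max?_id_cons] at h
    injection h with h
    subst h
    simp only [List.foldl_cons]
    cases hx : PySem.List.max? xs (fun y => y) with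
    | none =>
      have : xs = [] := (PySem.List.max?_eq_none_iff _ _).mp hx
      subst this; simp
    | some M' =>
      rw [ih x M' hx, ih (max d x) M' hx, max_assoc]

-- the loop of A, started at index s from accumulator (md, bb), in terms of B's ingredients
lemma pv_foldA_spec (t : Int) (l : List (Int × Int)) : ∀ (s md bb : Int),
    ((PySem.List.enumerate l s).foldl (pvStep t) (md, bb)) =
      (PySem.List.max? (l.map (fun p => |p.2 - p.1|)) (fun y => y)).elim (md, bb)
        (fun M =>
          if md < M ∧ t ≤ M then
            (M, s + (((PySem.List.index? (l.map (fun p => |p.2 - p.1|)) M).getD 0 : Nat) : Int))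
          else (md, bb)) := by
  induction l with
  | nil =>
    intro s md bb
    simp [PySem.List.enumerate, PySem.List.max?]
  | cons p l ih =>
    intro s md bb
    rw [PySem.List.enumerate_cons]
    simp only [List.foldl_cons, List.map_cons]
    rw [PySem.List.max?_id_cons]
    have hstep : pvStep t (md, bb) (s, p) =
        if md < |p.2 - p.1| ∧ t ≤ |p.2 - p.1| then (|p.2 - p.1|, s) else (md, bb) := by
      simp [pvStep]
    rw [hstep]
    set d := |p.2 - p.1| with hd
    cases hM : PySem.List.max? (l.map (fun p => |p.2 - p.1|)) (fun y => y) with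
    | none =>
      have hnil : l.map (fun p => |p.2 - p.1|) = [] := (PySem.List.max?_eq_none_iff _ _).mp hM
      have hlnil : l = [] := by
        cases l with
        | nil => rfl
        | cons a l => simp at hnil
      subst hlnil
      simp only [List.map_nil, List.foldl_nil, PySem.List.enumerate, Option.elim_some]
      by_cases hc : md < d ∧ t ≤ d
      · rw [if_pos hc, if_pos hc, PySem.List.index?_cons_self]
        simp only [Option.getD_some, Nat.cast_zero, add_zero]
      · rw [if_neg hc, if_neg hc]
    | some M' =>
      have hmax : (l.map (fun p => |p.2 - p.1|)).foldl max d = max d M' := pv_foldl_max_eq _ d M' hM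
      rw [hmax]
      have hmem : M' ∈ l.map (fun p => |p.2 - p.1|) := PySem.List.max?_mem hM
      obtain ⟨J', hJ'⟩ := Option.isSome_iff_exists.mp ((PySem.List.index?_isSome_iff (xs := l.map (fun p => |p.2 - p.1|)) (v := M')).mpr hmem)
      simp only [Option.elim_some]
      by_cases hc : md < d ∧ t ≤ d
      · rw [if_pos hc, ih, hM]
        simp only [Option.elim_some]
        by_cases hdM : d < M'
        · have hcond : d < M' ∧ t ≤ M' := And.intro hdM (le_trans hc.2 (le_of_lt hdM))
          rw [if_pos hcond]
          have hmx : max d M' = M' := max_eq_right (le_of_lt hdM)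
          rw [hmx, if_pos (And.intro (lt_trans hc.1 hdM) hcond.2)]
          rw [PySem.List.index?_cons_of_ne _ (ne_of_lt hdM), hJ']
          simp only [Option.map_some, Option.getD_some, Prod.mk.injEq]
          exact ⟨trivial, by push_cast; ring⟩
        · rw [if_neg (fun hcc => hdM hcc.1)]
          have hmx : max d M' = d := max_eq_left (le_of_not_gt hdM)
          rw [hmx, if_pos hc, PySem.List.index?_cons_self]
          simp
      · rw [if_neg hc, ih, hM]
        simp only [Option.elim_some]
        by_cases hcond : md < M' ∧ t ≤ M'
        · rw [if_pos hcond]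
          have hdM : d < M' := by
            rcases lt_or_ge d M' with h | h
            · exact h
            · exact absurd (And.intro (lt_of_lt_of_le hcond.1 h) (le_trans hcond.2 h)) hc
          have hmx : max d M' = M' := max_eq_right (le_of_lt hdM)
          rw [hmx, if_pos hcond]
          rw [PySem.List.index?_cons_of_ne _ (ne_of_lt hdM), hJ']
          simp only [Option.map_some, Option.getD_some, Prod.mk.injEq]
          exact ⟨trivial, by push_cast; ring⟩
        · rw [if_neg hcond]
          have hno : ¬ (md < max d M' ∧ t ≤ max d M') := by
            rcases le_total d M' with h | h
            · rw [max_eq_right h]; exact hcond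
            · rw [max_eq_left h]; exact hc
          rw [if_neg hno]

-- ===== VERDICT (by name: the statement is the Claim_ definition above) =====
theorem find_changed_byte_spec : Claim_equal_find_changed_byte := by
  intro baseline sample threshold _
  simp only [Spec_find_changed_byte, find_changed_byte, find_changed_byte_alt]
  rw [pv_foldA_spec]
  cases hM : PySem.List.max? ((List.zip baseline sample).map (fun p => |p.2 - p.1|)) (fun y => y) with
  | none =>
    simp
  | some M =>
    simp only [Option.elim_some, Option.getD_some]
    by_cases hc : 0 < M ∧ threshold ≤ M
    · rw [if_pos hc]
      have hnot : ¬ (M < threshold ∨ M ≤ 0) := by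
        intro h
        rcases h with h | h
        · exact absurd hc.2 (not_le_of_gt h)
        · exact absurd hc.1 (not_lt_of_ge h)
      rw [if_neg hnot]
      have hmem : M ∈ (List.zip baseline sample).map (fun p => |p.2 - p.1|) := PySem.List.max?_mem hM
      obtain ⟨k, hk⟩ := Option.isSome_iff_exists.mp ((PySem.List.index?_isSome_iff _ _).mpr hmem)
      rw [hk]
      simp
    · rw [if_neg hc]
      have hor : M < threshold ∨ M ≤ 0 := by
        by_contra h
        push_neg at h
        exact hc (And.intro (by omega) h.1)
      rw [if_pos hor]
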